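-- pv_equiv track=rewrite | github.com/chaedev3/baekjoon | 프로그래머스/2/60057. 문자열 압축/문자열 압축.py | solution
-- ===== SOURCE A (Python) =====
-- def solution(s):
--     answer = len(s)
--
--     for step in range(1, (len(s) // 2) + 1):
--         compressed = ''
--         count = 1
--         prev = s[0:step]
--
--         for j in range(step, len(s) + 1, step):
--             if prev == s[j:j+step]:
--                 count += 1
--             else:
--                 if count >= 2:
--                     compressed += str(count) + prev
--                 else:
--                     compressed += prev
--                 count = 1
--                 prev = s[j:j+step]
--         if count >= 2:
--             compressed += str(count) + prev
--         else:
--             compressed += prev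
--         answer = min(answer, len(compressed))
--     return answer
-- ===== SOURCE B (Python) =====
-- def solution(s):
--     n = len(s)
--     best = n
--     for t in range(1, n // 2 + 1):
--         bits = ''.join('1' if s[i:i + t] == s[i + t:i + 2 * t] else '0'
--                        for i in range(0, n - t, t))
--         total = n
--         for grp in bits.split('0'):
--             g = len(grp)
--             if g:
--                 total -= g * t - len(str(g + 1))
--         best = min(best, total)
--     return best
-- ===== Notes on version B (the rewrite author's own statement) =====
-- stated objective: alternative
-- what changed: A run-length-encodes the chunk stream with a prev/count state machine, building the compressed string and measuring it; B instead builds a bitstring recording which adjacent chunk boundaries match, splits it at the mismatch marks, and obtains the compressed length by subtracting each match-group's saving (g*step - len(str(g+1))) from len(s).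
import Mathlib
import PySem

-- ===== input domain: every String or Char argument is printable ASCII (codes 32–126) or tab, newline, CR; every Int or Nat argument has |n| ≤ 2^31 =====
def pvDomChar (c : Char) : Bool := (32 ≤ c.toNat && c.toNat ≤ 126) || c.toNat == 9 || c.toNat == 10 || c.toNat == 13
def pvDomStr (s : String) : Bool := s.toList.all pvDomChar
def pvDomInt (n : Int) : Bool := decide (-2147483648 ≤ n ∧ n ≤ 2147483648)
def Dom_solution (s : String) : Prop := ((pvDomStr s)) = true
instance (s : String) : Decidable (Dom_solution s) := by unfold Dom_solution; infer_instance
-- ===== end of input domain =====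

-- B replaces A's string-building prev/count state machine by a staged computation: a bitstring
-- of chunk-boundary matches, split at the mismatch marks, and the compressed length obtained by
-- subtracting each match-group's saving from len(s); objective: alternative (no speed claim).

-- ===== PORT A =====
def flushA (count : Int) (prev : List Char) : List Char :=
  if count ≥ 2 then PySem.Int.toChars count ++ prev else prev

def stepA (cs : List Char) (st : Int) (acc : List Char × Int × List Char) (j : Int) :
    List Char × Int × List Char :=
  if acc.2.2 = PySem.List.slice cs (some j) (some (j + st)) then
    (acc.1, acc.2.1 + 1, acc.2.2)
  else
    (acc.1 ++ flushA acc.2.1 acc.2.2, 1, PySem.List.slice cs (some j) (some (j + st)))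

def solution (s : String) : Int :=
  let cs := s.toList
  let n : Int := (cs.length : Int)
  (PySem.List.pyRange 1 (PySem.Int.floordiv n 2 + 1) 1).foldl
    (fun answer st =>
      let fin := (PySem.List.pyRange st (n + 1) st).foldl (stepA cs st)
                   ([], 1, PySem.List.slice cs (some 0) (some st))
      min answer (((fin.1 ++ flushA fin.2.1 fin.2.2).length : Int))) n

-- ===== PORT B =====
def solution_alt (s : String) : Int :=
  let cs := s.toList
  let n : Int := (cs.length : Int)
  (PySem.List.pyRange 1 (PySem.Int.floordiv n 2 + 1) 1).foldl
    (fun best t =>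
      -- bits = ''.join('1' if s[i:i+t] == s[i+t:i+2*t] else '0' for i in range(0, n-t, t))
      let bits : List Char := PySem.Chars.join []
        ((PySem.List.pyRange 0 (n - t) t).map (fun i =>
          [if PySem.List.slice cs (some i) (some (i + t))
              = PySem.List.slice cs (some (i + t)) (some (i + 2 * t)) then '1' else '0']))
      -- for grp in bits.split('0'): …   (sep '0' ≠ '' — splitOn is exactly str.split here)
      let total : Int := (PySem.Chars.splitOn bits ['0']).foldl
        (fun tot grp =>
          let g : Int := (grp.length : Int)
          if g ≠ 0 then tot - (g * t - ((PySem.Int.toChars (g + 1)).length : Int)) else tot) n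
      min best total) n

-- ===== PRECONDITION & SPEC =====
def Spec_solution (s : String) (out : Int) : Prop := out = solution_alt s
instance (s : String) (out : Int) : Decidable (Spec_solution s out) := by unfold Spec_solution; infer_instance

-- ===== CLAIM (what is proved, stated in full; the proofs are below) =====
def Claim_equal_solution : Prop := ∀ (s : String), Dom_solution s → Spec_solution s (solution s)

-- ===== LEMMAS AND PROOFS =====

-- the chunk of length st starting at i, = s[i:i+st]
def chunkOf (cs : List Char) (st i : Nat) : List Char := (cs.drop i).take st

theorem slice_chunkOf (cs : List Char) (st j : Nat) :
    PySem.List.slice cs (some (j : Int)) (some ((j : Int) + (st : Int))) = chunkOf cs st j :=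
  PySem.List.slice_natCast_add cs j st

theorem length_chunkOf (cs : List Char) (st i : Nat) :
    (chunkOf cs st i).length = min st (cs.length - i) := by
  simp [chunkOf]

-- pyRange with a positive step: nil / cons unfolding
theorem pyRange_pos_nil (a b s : Int) (hs : 0 < s) (hab : b ≤ a) :
    PySem.List.pyRange a b s = [] := by
  rw [PySem.List.pyRange_of_pos _ _ hs, if_neg (by omega)]
  simp

theorem pyRange_pos_cons (a b s : Int) (hs : 0 < s) (hab : a < b) :
    PySem.List.pyRange a b s = a :: PySem.List.pyRange (a + s) b s := by
  rw [PySem.List.pyRange_of_pos _ _ hs, PySem.List.pyRange_of_pos _ _ hs, if_pos hab]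
  by_cases h2 : a + s < b
  · rw [if_pos h2]
    have e2 : (b - a + s - 1) / s = (b - (a + s) + s - 1) / s + 1 := by
      have e1 : b - a + s - 1 = (b - (a + s) + s - 1) + 1 * s := by ring
      rw [e1, Int.add_mul_ediv_right _ _ (by omega)]
    have hnn : 0 ≤ (b - (a + s) + s - 1) / s := Int.ediv_nonneg (by omega) (by omega)
    have e3 : ((b - a + s - 1) / s).toNat = ((b - (a + s) + s - 1) / s).toNat + 1 := by omega
    rw [e3, List.range_succ_eq_map]
    simp only [List.map_cons, List.map_map, Int.mul_zero, Nat.cast_zero]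
    refine congrArg₂ List.cons (by ring) (List.map_congr_left ?_)
    intro k _
    simp only [Function.comp_apply, Nat.succ_eq_add_one]
    push_cast
    ring
  · rw [if_neg h2]
    have e1 : (b - a + s - 1) / s = 1 := by
      rw [← PySem.Int.floordiv_eq_ediv_of_pos hs, PySem.Int.floordiv_eq_iff_of_pos hs]
      constructor <;> omega
    rw [e1]
    simp

-- A's run counter, made explicit for the proofs: how far equal chunks extend
def runB (cs : List Char) (i st : Nat) : Nat → Nat → Nat
  | 0, run => run
  | fuel + 1, run =>
    if PySem.List.slice cs (some ((i + run * st : Nat) : Int))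
          (some (((i + run * st : Nat) : Int) + (st : Int)))
        = PySem.List.slice cs (some (i : Int)) (some ((i : Int) + (st : Int))) then
      runB cs i st fuel (run + 1)
    else run

-- the compressed length computed run by run (proof-side bridge between A and B)
def compB (cs : List Char) (st : Nat) : Nat → Nat → Nat
  | 0, _ => 0
  | fuel + 1, i =>
    if i < cs.length then
      let run := runB cs i st cs.length 1
      min st (cs.length - i) + (if run ≥ 2 then (PySem.Int.toChars (run : Int)).length else 0)
        + compB cs st fuel (i + run * st)
    else 0

-- runB never returns less than its starting counter
theorem runB_ge (cs : List Char) (i st : Nat) :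
    ∀ fuel run, run ≤ runB cs i st fuel run := by
  intro fuel
  induction fuel with
  | zero => intro run; simp [runB]
  | succ fuel ih =>
    intro run
    simp only [runB]
    split
    · exact Nat.le_trans (Nat.le_succ run) (ih (run + 1))
    · exact Nat.le_refl run

-- characterisation of runB: chunks strictly inside the run equal chunk i, the next one differs
theorem runB_spec (cs : List Char) (i st : Nat) (hi : i < cs.length) (hst : 0 < st) :
    ∀ fuel run, cs.length < i + run * st + fuel * st →
    (∀ t, run ≤ t → t < runB cs i st fuel run → chunkOf cs st (i + t * st) = chunkOf cs st i)
    ∧ chunkOf cs st (i + (runB cs i st fuel run) * st) ≠ chunkOf cs st i := by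
  intro fuel
  induction fuel with
  | zero =>
    intro run hbig
    simp only [runB]
    refine ⟨fun t htl htr => absurd htr (by omega), fun hc => ?_⟩
    have hl := congrArg List.length hc
    rw [length_chunkOf, length_chunkOf] at hl
    omega
  | succ fuel ih =>
    intro run hbig
    by_cases hc : PySem.List.slice cs (some ((i + run * st : Nat) : Int))
          (some (((i + run * st : Nat) : Int) + (st : Int)))
        = PySem.List.slice cs (some (i : Int)) (some ((i : Int) + (st : Int)))
    · rw [show runB cs i st (fuel + 1) run = runB cs i st fuel (run + 1) from by
        simp only [runB, if_pos hc]]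
      obtain ⟨iha, ihb⟩ := ih (run + 1)
        (by have hx : (run + 1) * st + fuel * st = run * st + (fuel + 1) * st := by ring
            omega)
      refine ⟨fun t htl htr => ?_, ihb⟩
      rcases Nat.eq_or_lt_of_le htl with rfl | hlt
      · rw [← slice_chunkOf cs st (i + run * st), ← slice_chunkOf cs st i]
        exact hc
      · exact iha t hlt htr
    · rw [show runB cs i st (fuel + 1) run = run from by simp only [runB, if_neg hc]]
      refine ⟨fun t htl htr => absurd htr (by omega), fun hcc => hc ?_⟩
      rw [slice_chunkOf cs st (i + run * st), slice_chunkOf cs st i]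
      exact hcc

-- the instance the proofs use: fuel = cs.length, starting counter 1
theorem runB_spec' (cs : List Char) (i st : Nat) (hi : i < cs.length) (hst : 0 < st) :
    (∀ t, 1 ≤ t → t < runB cs i st cs.length 1 → chunkOf cs st (i + t * st) = chunkOf cs st i)
    ∧ chunkOf cs st (i + (runB cs i st cs.length 1) * st) ≠ chunkOf cs st i :=
  runB_spec cs i st hi hst cs.length 1
    (by have hx : cs.length ≤ cs.length * st := Nat.le_mul_of_pos_right _ hst; omega)

-- compB is 0 past the end of the string, whatever the fuel
theorem compB_stop (cs : List Char) (st fuel i : Nat) (h : ¬ i < cs.length) :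
    compB cs st fuel i = 0 := by
  cases fuel <;> simp [compB, h]

theorem flushA_len (r : Nat) (prev : List Char) :
    (flushA (r : Int) prev).length
      = (if r ≥ 2 then (PySem.Int.toChars (r : Int)).length else 0) + prev.length := by
  by_cases h : r ≥ 2
  · rw [flushA, if_pos (by exact_mod_cast h), if_pos h]
    simp
  · rw [flushA, if_neg (by exact_mod_cast h), if_neg h]
    simp

-- length of A's inner fold-from-position-a result (compressed ++ final flush)
def AfoldLen (cs : List Char) (st a : Nat) (c : List Char) (cnt : Nat) (prev : List Char) : Nat :=
  let fin := (PySem.List.pyRange (a : Int) ((cs.length : Int) + 1) (st : Int)).foldl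
               (stepA cs (st : Int)) (c, (cnt : Int), prev)
  (fin.1 ++ flushA fin.2.1 fin.2.2).length

-- A's fold swallows the whole run: count climbs from t to runB while prev stays chunk i
theorem consume (cs : List Char) (i st : Nat) (hi : i < cs.length) (hst : 0 < st) :
    ∀ d t c, 1 ≤ t → t ≤ runB cs i st cs.length 1 → runB cs i st cs.length 1 - t = d →
      AfoldLen cs st (i + t * st) c t (chunkOf cs st i)
        = AfoldLen cs st (i + (runB cs i st cs.length 1) * st) c (runB cs i st cs.length 1)
            (chunkOf cs st i) := by
  intro d
  induction d with
  | zero =>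
    intro t c ht htr hd
    have : t = runB cs i st cs.length 1 := by omega
    rw [this]
  | succ d ih =>
    intro t c ht htr hd
    have htlt : t < runB cs i st cs.length 1 := by omega
    have hcheq : chunkOf cs st (i + t * st) = chunkOf cs st i :=
      (runB_spec' cs i st hi hst).1 t ht htlt
    have hlen : i + t * st < cs.length := by
      have h1 := congrArg List.length hcheq
      rw [length_chunkOf, length_chunkOf] at h1
      omega
    have hcons : PySem.List.pyRange ((i + t * st : Nat) : Int) ((cs.length : Int) + 1) (st : Int)
        = ((i + t * st : Nat) : Int) ::
          PySem.List.pyRange (((i + t * st : Nat) : Int) + (st : Int)) ((cs.length : Int) + 1) (st : Int) := by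
      exact pyRange_pos_cons _ _ _ (by exact_mod_cast hst) (by exact_mod_cast Nat.lt_succ_of_lt hlen)
    have hnext : (((i + t * st : Nat) : Int) + (st : Int)) = ((i + (t + 1) * st : Nat) : Int) := by
      push_cast; ring
    rw [AfoldLen, hcons, List.foldl_cons, stepA,
      if_pos (by rw [slice_chunkOf cs st (i + t * st)]; exact hcheq.symm), hnext]
    have : ((t : Int) + 1) = ((t + 1 : Nat) : Int) := by push_cast; ring
    rw [this]
    exact ih (t + 1) c (by omega) htlt (by omega)

-- main invariant: A's fold from the run start i computes c.length + compB from i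
theorem mainA (cs : List Char) (st : Nat) (hst : 0 < st) :
    ∀ fuel i c, i < cs.length → cs.length - i ≤ fuel →
      AfoldLen cs st (i + 1 * st) c 1 (chunkOf cs st i) = c.length + compB cs st fuel i := by
  intro fuel
  induction fuel with
  | zero => intro i c hi hf; exact absurd hf (by omega)
  | succ fuel ih =>
    intro i c hi hf
    have hr1 : 1 ≤ runB cs i st cs.length 1 := runB_ge cs i st cs.length 1
    have hstr : st ≤ runB cs i st cs.length 1 * st := Nat.le_mul_of_pos_left st (by omega)
    have hcons := consume cs i st hi hst (runB cs i st cs.length 1 - 1) 1 c (le_refl 1) hr1 rfl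
    have hne : chunkOf cs st (i + runB cs i st cs.length 1 * st) ≠ chunkOf cs st i :=
      (runB_spec' cs i st hi hst).2
    have hcomp : compB cs st (fuel + 1) i
        = min st (cs.length - i)
          + (if runB cs i st cs.length 1 ≥ 2 then
              (PySem.Int.toChars ((runB cs i st cs.length 1 : Nat) : Int)).length else 0)
          + compB cs st fuel (i + runB cs i st cs.length 1 * st) := by
      simp only [compB, if_pos hi]
    generalize hgen : runB cs i st cs.length 1 = r at hr1 hstr hcons hne hcomp
    rw [hcons]
    by_cases hle : i + r * st ≤ cs.length
    · -- the next chunk position is still inside [0, n]: A flushes at j = i + r*st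
      have hcons2 : PySem.List.pyRange ((i + r * st : Nat) : Int) ((cs.length : Int) + 1) (st : Int)
          = ((i + r * st : Nat) : Int) ::
            PySem.List.pyRange (((i + r * st : Nat) : Int) + (st : Int)) ((cs.length : Int) + 1) (st : Int) := by
        exact pyRange_pos_cons _ _ _ (by exact_mod_cast hst) (by exact_mod_cast Nat.lt_succ_of_le hle)
      rw [AfoldLen, hcons2, List.foldl_cons]
      simp only [stepA, slice_chunkOf]
      rw [if_neg (fun hc => hne hc.symm)]
      rcases Nat.lt_or_ge (i + r * st) cs.length with hlt | hge
      · -- strictly inside: recurse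
        have hnext : (((i + r * st : Nat) : Int) + (st : Int))
            = ((( i + r * st) + 1 * st : Nat) : Int) := by push_cast; ring
        rw [hnext]
        have hrec := ih (i + r * st) (c ++ flushA (r : Int) (chunkOf cs st i)) hlt (by omega)
        rw [AfoldLen] at hrec
        simp only [Nat.cast_one] at hrec
        rw [hrec, hcomp, List.length_append, flushA_len, length_chunkOf]
        omega
      · -- i + r*st = n: the sentinel chunk is empty, the tail range is empty
        have heq : i + r * st = cs.length := by omega
        have hnil : PySem.List.pyRange (((i + r * st : Nat) : Int) + (st : Int)) ((cs.length : Int) + 1) (st : Int) = [] := by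
          apply pyRange_pos_nil _ _ _ (by exact_mod_cast hst)
          push_cast
          omega
        rw [hnil, List.foldl_nil]
        have hchnil : chunkOf cs st (i + r * st) = [] := by
          rw [chunkOf, heq]
          simp
        have hfl1 : flushA (1 : Int) ([] : List Char) = [] := by
          rw [flushA, if_neg (by omega)]
        simp only [hchnil, hfl1]
        have hc0 : compB cs st fuel (i + r * st) = 0 := compB_stop cs st fuel _ (by omega)
        rw [hcomp, hc0, List.length_append, List.length_append, flushA_len, length_chunkOf]
        simp
        omega
    · -- the run ran off the end: no more range elements, only the final flush
      have hnil : PySem.List.pyRange ((i + r * st : Nat) : Int) ((cs.length : Int) + 1) (st : Int) = [] := by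
        apply pyRange_pos_nil _ _ _ (by exact_mod_cast hst)
        push_cast
        omega
      rw [AfoldLen, hnil, List.foldl_nil]
      dsimp only
      have hc0 : compB cs st fuel (i + r * st) = 0 := compB_stop cs st fuel _ (by omega)
      rw [hcomp, hc0, List.length_append, flushA_len, length_chunkOf]
      omega

-- per chunk size: the length of A's compressed string is compB
theorem perStep (cs : List Char) (st : Nat) (hn : 0 < cs.length) (hst : 0 < st) :
    (((PySem.List.pyRange (st : Int) ((cs.length : Int) + 1) (st : Int)).foldl
        (stepA cs (st : Int)) ([], 1, PySem.List.slice cs (some 0) (some (st : Int)))).1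
      ++ flushA ((PySem.List.pyRange (st : Int) ((cs.length : Int) + 1) (st : Int)).foldl
        (stepA cs (st : Int)) ([], 1, PySem.List.slice cs (some 0) (some (st : Int)))).2.1
        ((PySem.List.pyRange (st : Int) ((cs.length : Int) + 1) (st : Int)).foldl
        (stepA cs (st : Int)) ([], 1, PySem.List.slice cs (some 0) (some (st : Int)))).2.2).length
      = compB cs st cs.length 0 := by
  have h0 : PySem.List.slice cs (some 0) (some (st : Int)) = chunkOf cs st 0 := by
    have := slice_chunkOf cs st 0
    simpa using this
  have hst' : (st : Int) = ((0 + 1 * st : Nat) : Int) := by push_cast; ring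
  have h1 : (1 : Int) = ((1 : Nat) : Int) := rfl
  have := mainA cs st hst cs.length 0 [] hn (by omega)
  rw [AfoldLen] at this
  rw [h0, hst', h1]
  simpa using this

-- ===== B-side lemmas: the bitstring, split, and savings sum =====

def mapHead (f : List Char → List Char) : List (List Char) → List (List Char)
  | [] => []
  | h :: t => f h :: t

-- splitting a char list at every '0' (reference semantics of bits.split('0'))
def sp : List Char → List (List Char)
  | [] => [[]]
  | c :: rest => if c = '0' then [] :: sp rest else mapHead (c :: ·) (sp rest)

theorem mapHead_mapHead (f g : List Char → List Char) (l : List (List Char)) :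
    mapHead f (mapHead g l) = mapHead (fun h => f (g h)) l := by
  cases l <;> simp [mapHead]

theorem mapHead_congr (f g : List Char → List Char) (l : List (List Char))
    (h : ∀ x, f x = g x) : mapHead f l = mapHead g l := by
  cases l <;> simp [mapHead, h]

theorem mapHead_id (l : List (List Char)) : mapHead (fun h => h) l = l := by
  cases l <;> simp [mapHead]

theorem splitOn_go_eq (fuel : Nat) :
    ∀ (l cur acc : _), l.length ≤ fuel →
      PySem.Chars.splitOn.go ['0'] fuel l cur acc
        = acc.reverse ++ mapHead (fun h => cur.reverse ++ h) (sp l) := by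
  induction fuel with
  | zero =>
    intro l cur acc hl
    have : l = [] := List.length_eq_zero_iff.mp (by omega)
    subst this
    simp [PySem.Chars.splitOn.go, sp, mapHead]
  | succ fuel ih =>
    intro l cur acc hl
    cases l with
    | nil => simp [PySem.Chars.splitOn.go, sp, mapHead]
    | cons c rest =>
      by_cases hc : c = '0'
      · subst hc
        rw [show PySem.Chars.splitOn.go ['0'] (fuel + 1) ('0' :: rest) cur acc
              = PySem.Chars.splitOn.go ['0'] fuel rest [] (cur.reverse :: acc) from by
            simp [PySem.Chars.splitOn.go, List.isPrefixOf]]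
        rw [ih rest [] (cur.reverse :: acc) (by simpa using Nat.lt_succ_iff.mp (by simpa using hl))]
        simp [sp, mapHead]
        cases sp rest <;> rfl
      · rw [show PySem.Chars.splitOn.go ['0'] (fuel + 1) (c :: rest) cur acc
              = PySem.Chars.splitOn.go ['0'] fuel rest (c :: cur) acc from by
            simp only [PySem.Chars.splitOn.go, List.isPrefixOf]
            simp
            exact fun h => absurd h.symm hc]
        rw [ih rest (c :: cur) acc (by simpa using Nat.lt_succ_iff.mp (by simpa using hl))]
        rw [sp, if_neg hc, mapHead_mapHead]
        refine congrArg _ (mapHead_congr _ _ _ ?_)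
        intro x
        simp

theorem splitOn_eq_sp (l : List Char) : PySem.Chars.splitOn l ['0'] = sp l := by
  rw [PySem.Chars.splitOn, splitOn_go_eq (l.length + 1) l [] [] (by omega)]
  simp [mapHead_id]

theorem sp_replicate (g : Nat) : sp (List.replicate g '1') = [List.replicate g '1'] := by
  induction g with
  | zero => simp [sp]
  | succ g ih => simp [List.replicate_succ, sp, ih, mapHead]

theorem sp_replicate_append (g : Nat) (rest : List Char) :
    sp (List.replicate g '1' ++ '0' :: rest) = List.replicate g '1' :: sp rest := by
  induction g with
  | zero => simp [sp]
  | succ g ih => simp [List.replicate_succ, sp, ih, mapHead]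

-- a fold that only subtracts is init minus the sum
theorem foldl_sub (c : List (Char) → Int) :
    ∀ (l : List (List Char)) (n : Int),
      l.foldl (fun a x => a - c x) n = n - (l.map c).sum := by
  intro l
  induction l with
  | nil => simp
  | cons x xs ih => intro n; simp [ih, sub_sub]

-- the per-group saving B subtracts
def cFn (t : Nat) (grp : List Char) : Int :=
  if (grp.length : Int) ≠ 0 then
    (grp.length : Int) * (t : Nat) - ((PySem.Int.toChars ((grp.length : Int) + 1)).length : Int)
  else 0

-- the boundary-match bitstring from chunk start i on
def bitsFrom (cs : List Char) (t i : Nat) : List Char :=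
  (PySem.List.pyRange (i : Int) ((cs.length : Int) - (t : Int)) (t : Int)).map (fun j =>
    if PySem.List.slice cs (some j) (some (j + (t : Int)))
        = PySem.List.slice cs (some (j + (t : Int))) (some (j + 2 * (t : Int))) then '1' else '0')

theorem bitsFrom_nil (cs : List Char) (t i : Nat) (ht : 0 < t)
    (h : ¬ i + t < cs.length) : bitsFrom cs t i = [] := by
  rw [bitsFrom, pyRange_pos_nil _ _ _ (by exact_mod_cast ht) (by omega)]
  simp

theorem bitsFrom_cons (cs : List Char) (t i : Nat) (ht : 0 < t)
    (h : i + t < cs.length) :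
    bitsFrom cs t i
      = (if chunkOf cs t i = chunkOf cs t (i + t) then '1' else '0') :: bitsFrom cs t (i + t) := by
  rw [bitsFrom, pyRange_pos_cons _ _ _ (by exact_mod_cast ht) (by omega), List.map_cons]
  have e2 : ((i : Int) + 2 * (t : Int)) = (((i + t : Nat) : Int) + (t : Int)) := by push_cast; ring
  have e1 : ((i : Int) + (t : Int)) = ((i + t : Nat) : Int) := by push_cast; ring
  rw [slice_chunkOf cs t i, e2, e1, slice_chunkOf cs t (i + t), bitsFrom]

-- a run of g+1 equal chunks contributes g ones to the bitstring
theorem runDecomp (cs : List Char) (t i : Nat) (ht : 0 < t) (hi : i < cs.length) :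
    ∀ g, (∀ m, m ≤ g → chunkOf cs t (i + m * t) = chunkOf cs t i) →
      bitsFrom cs t i = List.replicate g '1' ++ bitsFrom cs t (i + g * t) := by
  intro g
  induction g with
  | zero => intro _; simp
  | succ g ih =>
    intro hyp
    have hch : chunkOf cs t (i + (g + 1) * t) = chunkOf cs t i := hyp (g + 1) (le_refl _)
    have hchg : chunkOf cs t (i + g * t) = chunkOf cs t i := hyp g (by omega)
    -- chunk i is nonempty, so the chunk at i+(g+1)t starts strictly inside the string
    have hlen := congrArg List.length hch
    rw [length_chunkOf, length_chunkOf] at hlen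
    have hin : i + g * t + t < cs.length := by
      have : i + (g + 1) * t = i + g * t + t := by ring
      omega
    have hbit : bitsFrom cs t (i + g * t)
        = '1' :: bitsFrom cs t (i + g * t + t) := by
      rw [bitsFrom_cons cs t (i + g * t) ht hin, if_pos]
      rw [hchg, show i + g * t + t = i + (g + 1) * t from by ring, hch]
    rw [ih (fun m hm => hyp m (by omega)), hbit,
      show i + g * t + t = i + (g + 1) * t from by ring,
      List.replicate_succ']
    simp

-- the bridge: n - (savings summed over the '0'-split groups) = the compressed length
theorem bridge (cs : List Char) (t : Nat) (ht : 0 < t) :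
    ∀ fuel i, i < cs.length → cs.length - i ≤ fuel →
      ((cs.length : Int) - (i : Int)) - ((sp (bitsFrom cs t i)).map (cFn t)).sum
        = (compB cs t fuel i : Int) := by
  intro fuel
  induction fuel with
  | zero => intro i hi hf; exact absurd hf (by omega)
  | succ fuel ih =>
    intro i hi hf
    have hr1 : 1 ≤ runB cs i t cs.length 1 := runB_ge cs i t cs.length 1
    obtain ⟨hruns, hne⟩ := runB_spec' cs i t hi ht
    have hcomp : compB cs t (fuel + 1) i
        = min t (cs.length - i)
          + (if runB cs i t cs.length 1 ≥ 2 then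
              (PySem.Int.toChars ((runB cs i t cs.length 1 : Nat) : Int)).length else 0)
          + compB cs t fuel (i + runB cs i t cs.length 1 * t) := by
      simp only [compB, if_pos hi]
    generalize hgen : runB cs i t cs.length 1 = r at hr1 hruns hne hcomp
    -- the last chunk of the run still equals chunk i
    have hEqLast : chunkOf cs t (i + (r - 1) * t) = chunkOf cs t i := by
      rcases Nat.eq_or_lt_of_le hr1 with h1 | h2
      · rw [← h1]; simp
      · exact hruns (r - 1) (by omega) (by omega)
    -- for r ≥ 2 every chunk of the run is full
    have hfull : 2 ≤ r → min t (cs.length - i) = t ∧ i + r * t ≤ cs.length := by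
      intro h2
      have hc1 := hruns 1 (le_refl 1) (by omega)
      have hl1 := congrArg List.length hc1
      rw [length_chunkOf, length_chunkOf] at hl1
      have hmin : min t (cs.length - i) = t := by
        simp only [one_mul] at hl1
        omega
      have hll := congrArg List.length hEqLast
      rw [length_chunkOf, length_chunkOf] at hll
      have : (r - 1) * t + t = r * t := by
        have : r - 1 + 1 = r := by omega
        calc (r - 1) * t + t = (r - 1 + 1) * t := by ring
        _ = r * t := by rw [this]
      omega
    have hdecomp : bitsFrom cs t i
        = List.replicate (r - 1) '1' ++ bitsFrom cs t (i + (r - 1) * t) := by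
      refine runDecomp cs t i ht hi (r - 1) ?_
      intro m hm
      rcases Nat.eq_zero_or_pos m with rfl | hmpos
      · simp
      · exact hruns m (by omega) (by omega)
    have hstep : i + (r - 1) * t + t = i + r * t := by
      have : r - 1 + 1 = r := by omega
      calc i + (r - 1) * t + t = i + (r - 1 + 1) * t := by ring
      _ = i + r * t := by rw [this]
    -- the saving of the run's group of ones
    have hcrep : cFn t (List.replicate (r - 1) '1')
        = if 2 ≤ r then ((r - 1 : Nat) : Int) * (t : Int)
            - ((PySem.Int.toChars ((r : Nat) : Int)).length : Int) else 0 := by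
      by_cases h2 : 2 ≤ r
      · rw [cFn, if_pos (by simp; omega), if_pos h2]
        have : (((List.replicate (r - 1) '1').length : Int)) = ((r - 1 : Nat) : Int) := by simp
        rw [this]
        have : ((r - 1 : Nat) : Int) + 1 = ((r : Nat) : Int) := by omega
        rw [this]
      · have hr : r = 1 := by omega
        subst hr
        simp [cFn]
    by_cases hcase : i + r * t < cs.length
    · -- a '0' boundary follows the run
      have hbits : bitsFrom cs t (i + (r - 1) * t)
          = '0' :: bitsFrom cs t (i + r * t) := by
        rw [bitsFrom_cons cs t (i + (r - 1) * t) ht (by omega), if_neg, hstep]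
        rw [hEqLast, hstep]
        exact fun hc => hne hc.symm
      rw [hdecomp, hbits, sp_replicate_append, hcomp]
      have hIH := ih (i + r * t) hcase (by
        have : t ≤ r * t := Nat.le_mul_of_pos_left t (by omega)
        omega)
      simp only [List.map_cons, List.sum_cons]
      rw [hcrep]
      push_cast [← hIH]
      by_cases h2 : 2 ≤ r
      · obtain ⟨hmin, _⟩ := hfull h2
        have hminI : min ((t : Nat) : Int) ((cs.length - i : Nat) : Int) = ((t : Nat) : Int) := by
          exact_mod_cast hmin
        rw [if_pos h2, if_pos h2, hminI]
        have hr1' : ((r - 1 : Nat) : Int) = (r : Int) - 1 := by omega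
        rw [hr1']
        push_cast
        ring
      · have hr : r = 1 := by omega
        subst hr
        rw [if_neg h2, if_neg h2]
        have hminI : min ((t : Nat) : Int) ((cs.length - i : Nat) : Int) = ((t : Nat) : Int) := by
          have hmin : min t (cs.length - i) = t := by omega
          exact_mod_cast hmin
        rw [hminI]
        push_cast
        ring
    · -- the run reaches the end of the string: the bitstring ends with the ones
      have hbits : bitsFrom cs t (i + (r - 1) * t) = [] := by
        exact bitsFrom_nil cs t (i + (r - 1) * t) ht (by omega)
      rw [hdecomp, hbits, List.append_nil, sp_replicate, hcomp,
        compB_stop cs t fuel (i + r * t) (by omega)]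
      simp only [List.map_cons, List.map_nil, List.sum_cons, List.sum_nil, add_zero]
      rw [hcrep]
      by_cases h2 : 2 ≤ r
      · obtain ⟨hmin, hle⟩ := hfull h2
        have heq : i + r * t = cs.length := by omega
        rw [if_pos h2, if_pos h2, hmin]
        have hr1' : ((r - 1 : Nat) : Int) = (r : Int) - 1 := by omega
        have hnrt : ((cs.length : Int)) = (i : Int) + (r : Int) * (t : Int) := by
          exact_mod_cast congrArg (Nat.cast : Nat → Int) heq.symm
        rw [hr1', hnrt]
        push_cast
        ring
      · have hr : r = 1 := by omega
        subst hr
        rw [if_neg h2, if_neg h2]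
        have hmin : min t (cs.length - i) = cs.length - i := by omega
        rw [hmin]
        push_cast
        omega

-- ===== VERDICT (by name: the statement is the Claim_ definition above) =====
theorem solution_spec : Claim_equal_solution := by
  intro s _
  unfold Spec_solution
  simp only [solution, solution_alt]
  have hfd : PySem.Int.floordiv ((s.toList.length : Int)) 2 = ((s.toList.length / 2 : Nat) : Int) := by
    exact_mod_cast PySem.Int.floordiv_natCast s.toList.length 2
  rw [hfd]
  have hrange := PySem.List.pyRange_one 1 (((s.toList.length / 2 : Nat) : Int) + 1)
  have htn : ((((s.toList.length / 2 : Nat) : Int) + 1 - 1)).toNat = s.toList.length / 2 := by omega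
  rw [htn] at hrange
  rw [hrange, List.foldl_map, List.foldl_map]
  apply PySem.List.foldl_congr_mem
  intro acc k hk
  have hk' : k < s.toList.length / 2 := List.mem_range.mp hk
  have hn : 0 < s.toList.length := by omega
  have hcast : ((1 : Int) + (k : Int)) = (((k + 1 : Nat)) : Int) := by push_cast; ring
  rw [hcast]
  congr 1
  -- A's side equals compB
  rw [show (((((PySem.List.pyRange ((k + 1 : Nat) : Int) ((s.toList.length : Int) + 1) ((k + 1 : Nat) : Int)).foldl
        (stepA s.toList ((k + 1 : Nat) : Int)) ([], 1, PySem.List.slice s.toList (some 0) (some ((k + 1 : Nat) : Int)))).1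
      ++ flushA ((PySem.List.pyRange ((k + 1 : Nat) : Int) ((s.toList.length : Int) + 1) ((k + 1 : Nat) : Int)).foldl
        (stepA s.toList ((k + 1 : Nat) : Int)) ([], 1, PySem.List.slice s.toList (some 0) (some ((k + 1 : Nat) : Int)))).2.1
        ((PySem.List.pyRange ((k + 1 : Nat) : Int) ((s.toList.length : Int) + 1) ((k + 1 : Nat) : Int)).foldl
        (stepA s.toList ((k + 1 : Nat) : Int)) ([], 1, PySem.List.slice s.toList (some 0) (some ((k + 1 : Nat) : Int)))).2.2).length : Nat) : Int)
      = ((compB s.toList (k + 1) s.toList.length 0 : Nat) : Int) from by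
    exact_mod_cast congrArg (Nat.cast : Nat → Int) (perStep s.toList (k + 1) hn (by omega))]
  -- B's side: the joined bitstring is bitsFrom 0, split is sp, the fold subtracts the savings
  have hjoin : PySem.Chars.join []
      ((PySem.List.pyRange 0 ((s.toList.length : Int) - ((k + 1 : Nat) : Int)) ((k + 1 : Nat) : Int)).map (fun i =>
        [if PySem.List.slice s.toList (some i) (some (i + ((k + 1 : Nat) : Int)))
            = PySem.List.slice s.toList (some (i + ((k + 1 : Nat) : Int))) (some (i + 2 * ((k + 1 : Nat) : Int))) then '1' else '0']))
      = bitsFrom s.toList (k + 1) 0 := by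
    rw [show ((PySem.List.pyRange 0 ((s.toList.length : Int) - ((k + 1 : Nat) : Int)) ((k + 1 : Nat) : Int)).map (fun i =>
        [if PySem.List.slice s.toList (some i) (some (i + ((k + 1 : Nat) : Int)))
            = PySem.List.slice s.toList (some (i + ((k + 1 : Nat) : Int))) (some (i + 2 * ((k + 1 : Nat) : Int))) then '1' else '0']))
      = (bitsFrom s.toList (k + 1) 0).map (fun c => [c]) from by
        rw [bitsFrom, List.map_map]
        rfl]
    exact PySem.Chars.join_nil_singletons _
  rw [hjoin, splitOn_eq_sp]
  have hbody : (fun (tot : Int) (grp : List Char) =>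
        let g : Int := (grp.length : Int)
        if g ≠ 0 then tot - (g * ((k + 1 : Nat) : Int) - ((PySem.Int.toChars (g + 1)).length : Int)) else tot)
      = (fun (tot : Int) (grp : List Char) => tot - cFn (k + 1) grp) := by
    funext tot grp
    simp only [cFn]
    split_ifs with h
    · rfl
    · simp
  rw [hbody, foldl_sub]
  have := bridge s.toList (k + 1) (by omega) s.toList.length 0 hn (by omega)
  simp only [Nat.cast_zero, sub_zero] at this
  rw [this]
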